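-- pv_equiv track=rewrite | github.com/Qirky/FoxDot | FoxDot/lib/Workspace/Format.py | find_comment
-- ===== SOURCE A (Python) =====
-- def find_comment(line):
--     """ Finds the index of a comment # and returns None if not found """
--     instring, instring_char = False, ""
--     for i, char in enumerate(line):
--         if char in ('"', "'"):
--             if instring:
--                 if char == instring_char:
--                     instring = False
--                     instring_char = ""
--             else:
--                 instring = True
--                 instring_char = char
--         elif char == "#":
--           if not instring:
--               return i
--     return None
-- ===== SOURCE B (Python) =====
-- def find_comment(line):
--     """ Finds the index of a comment # and returns None if not found """
--     # Pass 1: mask[i] = True iff index i is inside a string literal (state on entry).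
--     n = len(line)
--     mask = [False] * n
--     quote = None
--     for i, ch in enumerate(line):
--         mask[i] = quote is not None
--         if ch in ('"', "'"):
--             if quote is None:
--                 quote = ch
--             elif ch == quote:
--                 quote = None
--     # Pass 2: first unmasked '#'.
--     for i, ch in enumerate(line):
--         if ch == '#' and not mask[i]:
--             return i
--     return None
-- ===== Notes on version B (the rewrite author's own statement) =====
-- stated objective: alternative
-- what changed: B splits the work into two passes: it first builds a boolean in-string mask for every index using an Option-typed quote state, then separately scans for the first comment character whose mask entry is False, instead of A's single early-return scan with a Bool flag plus stored quote char.
import Mathlib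
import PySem

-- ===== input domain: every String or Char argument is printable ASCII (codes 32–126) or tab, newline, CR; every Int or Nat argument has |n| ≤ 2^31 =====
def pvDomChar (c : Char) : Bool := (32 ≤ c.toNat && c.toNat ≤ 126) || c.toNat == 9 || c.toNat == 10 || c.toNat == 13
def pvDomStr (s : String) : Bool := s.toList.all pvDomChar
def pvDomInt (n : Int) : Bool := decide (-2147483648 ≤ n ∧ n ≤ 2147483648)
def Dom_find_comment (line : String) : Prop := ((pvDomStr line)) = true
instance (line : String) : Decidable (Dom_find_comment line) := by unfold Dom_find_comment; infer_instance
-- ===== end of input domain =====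

-- ===== PORT A =====
-- A's loop: single scan with early return; instring_char "" ported as the sentinel ' '
-- (it is only compared while instring = true, when it always holds a real quote char).
def pvLoopA : List Char → Bool → Char → Int → Option Int
  | [], _, _, _ => none
  | c :: cs, instring, sc, i =>
    if c = '"' ∨ c = '\'' then
      (if instring then
        (if c = sc then pvLoopA cs false ' ' (i + 1) else pvLoopA cs instring sc (i + 1))
      else pvLoopA cs true c (i + 1))
    else if c = '#' then
      (if !instring then some i else pvLoopA cs instring sc (i + 1))
    else pvLoopA cs instring sc (i + 1)

def find_comment (line : String) : Option Int :=
  pvLoopA line.toList false ' ' 0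

-- ===== PORT B =====
-- Pass 1: in-string mask (state on entry to each index), quote state as Option Char.
def pvMaskB : List Char → Option Char → List Bool
  | [], _ => []
  | c :: cs, q =>
    q.isSome :: pvMaskB cs
      (if c = '"' ∨ c = '\'' then
        (match q with
          | none => some c
          | some qc => if c = qc then none else some qc)
      else q)

-- Pass 2: first index with an unmasked '#'.
def pvScanB : List Char → List Bool → Int → Option Int
  | c :: cs, m :: ms, i => if c = '#' ∧ m = false then some i else pvScanB cs ms (i + 1)
  | _, _, _ => none

def find_comment_alt (line : String) : Option Int :=
  pvScanB line.toList (pvMaskB line.toList none) 0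

-- ===== PRECONDITION & SPEC =====
def Spec_find_comment (line : String) (out : Option Int) : Prop := out = find_comment_alt line
instance (line : String) (out : Option Int) : Decidable (Spec_find_comment line out) := by unfold Spec_find_comment; infer_instance

-- ===== CLAIM (what is proved, stated in full; the proofs are below) =====
def Claim_equal_find_comment : Prop := ∀ (line : String), Dom_find_comment line → Spec_find_comment line (find_comment line)

-- ===== LEMMAS AND PROOFS =====
-- A's state (instring, sc) corresponds to B's state q via instring = q.isSome, sc = q.getD ' '.
theorem pvLoopA_eq_scan_mask : ∀ (cs : List Char) (q : Option Char) (i : Int),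
    pvLoopA cs q.isSome (q.getD ' ') i = pvScanB cs (pvMaskB cs q) i := by
  intro cs
  induction cs with
  | nil => intro q i; rfl
  | cons c cs ih =>
    intro q i
    cases q with
    | none =>
      by_cases hq : c = '"' ∨ c = '\''
      · have hh : c ≠ '#' := by rcases hq with h | h <;> simp [h]
        simpa [pvLoopA, pvMaskB, pvScanB, hq, hh] using ih (some c) (i + 1)
      · by_cases hh : c = '#'
        · simp [pvLoopA, pvMaskB, pvScanB, hq, hh]
        · simpa [pvLoopA, pvMaskB, pvScanB, hq, hh] using ih none (i + 1)
    | some qc =>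
      by_cases hq : c = '"' ∨ c = '\''
      · have hh : c ≠ '#' := by rcases hq with h | h <;> simp [h]
        by_cases hc : c = qc
        · subst hc
          simpa [pvLoopA, pvMaskB, pvScanB, hq, hh] using ih none (i + 1)
        · simpa [pvLoopA, pvMaskB, pvScanB, hq, hc, hh] using ih (some qc) (i + 1)
      · by_cases hh : c = '#'
        · simpa [pvLoopA, pvMaskB, pvScanB, hq, hh] using ih (some qc) (i + 1)
        · simpa [pvLoopA, pvMaskB, pvScanB, hq, hh] using ih (some qc) (i + 1)

-- ===== VERDICT (by name: the statement is the Claim_ definition above) =====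
theorem find_comment_spec : Claim_equal_find_comment := by
  intro line _
  show find_comment line = find_comment_alt line
  simpa [find_comment, find_comment_alt] using pvLoopA_eq_scan_mask line.toList none 0
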